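-- pv_equiv track=rewrite | github.com/jaiminjariwala/CSCI_6212_DAA_Project_1 | project_1.py | execute_loops
-- ===== SOURCE A (Python) =====
-- import math
--
-- def execute_loops(n):
--     a = [1] * (n + 1)   # create lists of size n+1 initialized to 1
--     b = [1] * (n + 1)
--     c = [1] * (n + 1)
--     Sum = 0
--     i = 1
--     # using while loops rather than for loop to match pseudo code because for loops in python are not exactly like in C/C++. In python for loops, if the values in the range are modified inside the loop, it does not affect the loop iteration.
--     while i <= n:
--         j = i
--         while j <= n:
--             for k in range(j, n + 1):
--                 Sum += a[i] * b[j] * c[k]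
--             if math.gcd(i, j) == 1:
--                 j = n
--             j += 1
--         i += 1
--     return Sum
-- ===== SOURCE B (Python) =====
-- def execute_loops(n):
--     # Closed form: i=1 contributes n triples (gcd(1,1)=1 ends the j-loop after j=1);
--     # each i in 2..n contributes (n-i+1)+(n-i) since gcd(i,i)=i!=1 and gcd(i,i+1)=1.
--     # Total = n + sum_{i=2}^{n} (2*(n-i)+1) = n*n - n + 1 for n >= 1, else 0.
--     return n * n - n + 1 if n >= 1 else 0
-- ===== Notes on version B (the rewrite author's own statement) =====
-- stated objective: faster
-- what changed: Replaces the nested while/for loops (with list indexing and gcd-driven early exit) by the closed-form n*n-n+1 for n>=1 and 0 otherwise, derived from gcd(1,1)=1, gcd(i,i)=i and gcd(i,i+1)=1.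
import Mathlib
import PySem

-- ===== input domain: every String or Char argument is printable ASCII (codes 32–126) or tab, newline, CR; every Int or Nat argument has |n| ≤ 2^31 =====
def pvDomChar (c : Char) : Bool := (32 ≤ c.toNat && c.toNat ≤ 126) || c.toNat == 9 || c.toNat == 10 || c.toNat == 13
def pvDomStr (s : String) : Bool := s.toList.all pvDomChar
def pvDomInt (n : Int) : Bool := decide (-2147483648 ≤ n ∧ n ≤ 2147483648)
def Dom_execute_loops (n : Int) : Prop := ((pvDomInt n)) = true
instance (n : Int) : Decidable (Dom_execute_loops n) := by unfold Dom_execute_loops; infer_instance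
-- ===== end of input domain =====

-- B replaces A's nested loops by the closed form n*n - n + 1 (n ≥ 1), else 0.

-- ===== PORT A =====
-- inner 'while j <= n' loop; a[i]/b[j]/c[k] indexing is in range throughout, so pyGetD _ _ 0 is exact here.
-- 'j = n; j += 1' on the gcd branch is transcribed as the next j being n + 1.
def pvInner (n i j : Int) (a b c : List Int) (S : Int) : Int :=
  if _h : j ≤ n then
    pvInner n i (if Int.gcd i j = 1 then n + 1 else j + 1) a b c
      ((PySem.List.pyRange j (n + 1) 1).foldl
        (fun s k => s + PySem.List.pyGetD a i 0 * PySem.List.pyGetD b j 0 * PySem.List.pyGetD c k 0) S)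
  else S
termination_by (n + 1 - j).toNat
decreasing_by split_ifs <;> omega

-- outer 'while i <= n' loop
def pvOuter (n i : Int) (a b c : List Int) (S : Int) : Int :=
  if _h : i ≤ n then pvOuter n (i + 1) a b c (pvInner n i i a b c S) else S
termination_by (n + 1 - i).toNat
decreasing_by omega

def execute_loops (n : Int) : Int :=
  let a := List.replicate (n + 1).toNat 1
  let b := List.replicate (n + 1).toNat 1
  let c := List.replicate (n + 1).toNat 1
  pvOuter n 1 a b c 0

-- ===== PORT B =====
def execute_loops_alt (n : Int) : Int := if 1 ≤ n then n * n - n + 1 else 0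

-- ===== PRECONDITION & SPEC =====
def Spec_execute_loops (n : Int) (out : Int) : Prop := out = execute_loops_alt n
instance (n : Int) (out : Int) : Decidable (Spec_execute_loops n out) := by unfold Spec_execute_loops; infer_instance

-- ===== CLAIM (what is proved, stated in full; the proofs are below) =====
def Claim_equal_execute_loops : Prop := ∀ (n : Int), Dom_execute_loops n → Spec_execute_loops n (execute_loops n)

-- ===== LEMMAS AND PROOFS =====

theorem pv_getD_ones (n t : Int) (h0 : 0 ≤ t) (h1 : t ≤ n) :
    PySem.List.pyGetD (List.replicate (n + 1).toNat 1) t 0 = (1 : Int) := by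
  rw [PySem.List.pyGetD_eq_getElem _ _ h0 (by simpa using by omega)]
  simp

theorem pv_fold_ones (g : Int → Int) :
    ∀ (l : List Int), (∀ k ∈ l, g k = 1) →
      ∀ S : Int, l.foldl (fun s k => s + 1 * 1 * g k) S = S + l.length := by
  intro l
  induction l with
  | nil => intro _ S; simp
  | cons x xs ih =>
      intro hmem S
      rw [List.foldl_cons, hmem x (by simp), ih (fun k hk => hmem k (by simp [hk]))]
      simp only [List.length_cons]
      push_cast
      omega

theorem pv_body_fold (n i j S : Int) (hi0 : 0 ≤ i) (hi : i ≤ n) (hj0 : 0 ≤ j) (hj : j ≤ n) :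
    (PySem.List.pyRange j (n + 1) 1).foldl
      (fun s k => s + PySem.List.pyGetD (List.replicate (n + 1).toNat 1) i 0 *
        PySem.List.pyGetD (List.replicate (n + 1).toNat 1) j 0 *
        PySem.List.pyGetD (List.replicate (n + 1).toNat 1) k 0) S = S + (n + 1 - j) := by
  rw [pv_getD_ones n i hi0 hi, pv_getD_ones n j hj0 hj]
  rw [pv_fold_ones (fun k => PySem.List.pyGetD (List.replicate (n + 1).toNat 1) k 0) _
    (fun k hk => by
      rw [PySem.List.mem_pyRange_one] at hk
      exact pv_getD_ones n k (by omega) (by omega)) S]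
  rw [PySem.List.length_pyRange_one]
  omega

theorem pv_gcd_succ (i : Int) (h : 0 ≤ i) : Int.gcd i (i + 1) = 1 := by
  have heq : Int.gcd i (i + 1) = Nat.gcd i.toNat (i.toNat + 1) := by
    rw [Int.gcd]; congr 1 <;> omega
  rw [heq]
  simp

theorem pv_inner_one (n S : Int) (hn : 1 ≤ n) :
    pvInner n 1 1 (List.replicate (n + 1).toNat 1) (List.replicate (n + 1).toNat 1)
      (List.replicate (n + 1).toNat 1) S = S + n := by
  rw [pvInner]
  simp only [hn, dif_pos]
  rw [pv_body_fold n 1 1 S (by omega) hn (by omega) hn]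
  have hg : Int.gcd 1 1 = 1 := by decide
  rw [if_pos hg, pvInner]
  rw [dif_neg (by omega : ¬ (n + 1 ≤ n))]
  omega

theorem pv_inner_ge_two (n i S : Int) (h2 : 2 ≤ i) (hi : i ≤ n) :
    pvInner n i i (List.replicate (n + 1).toNat 1) (List.replicate (n + 1).toNat 1)
      (List.replicate (n + 1).toNat 1) S = S + (2 * (n - i) + 1) := by
  rw [pvInner]
  simp only [hi, dif_pos]
  rw [pv_body_fold n i i S (by omega) hi (by omega) hi]
  have hg : ¬ (Int.gcd i i = 1) := by rw [Int.gcd_self]; omega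
  rw [if_neg hg]
  by_cases hin : i + 1 ≤ n
  · rw [pvInner]
    simp only [hin, dif_pos]
    rw [pv_body_fold n i (i + 1) _ (by omega) hi (by omega) hin]
    rw [if_pos (pv_gcd_succ i (by omega)), pvInner]
    rw [dif_neg (by omega : ¬ (n + 1 ≤ n))]
    omega
  · rw [pvInner]
    rw [dif_neg hin]
    omega

theorem pv_outer_eval (n : Int) : ∀ (fuel : Nat) (i S : Int),
    (n + 1 - i).toNat = fuel → 2 ≤ i → i ≤ n + 1 →
    pvOuter n i (List.replicate (n + 1).toNat 1) (List.replicate (n + 1).toNat 1)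
      (List.replicate (n + 1).toNat 1) S = S + (n - i + 1) * (n - i + 1) := by
  intro fuel
  induction fuel with
  | zero =>
      intro i S hf h2 hle
      rw [pvOuter, dif_neg (by omega : ¬ i ≤ n)]
      have h : n - i + 1 = 0 := by omega
      rw [h]; ring
  | succ m ih =>
      intro i S hf h2 hle
      rw [pvOuter]
      by_cases h : i ≤ n
      · rw [dif_pos h, pv_inner_ge_two n i S h2 h,
          ih (i + 1) _ (by omega) (by omega) (by omega)]
        ring
      · rw [dif_neg h]
        have h0 : n - i + 1 = 0 := by omega
        rw [h0]; ring

theorem pv_main (n : Int) : execute_loops n = execute_loops_alt n := by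
  unfold execute_loops execute_loops_alt
  by_cases hn : 1 ≤ n
  · rw [if_pos hn, pvOuter]
    rw [dif_pos hn, pv_inner_one n 0 hn]
    rw [show (0 : Int) + n = n by ring, show (1 : Int) + 1 = 2 from rfl]
    rw [pv_outer_eval n (n - 1).toNat 2 n (by omega) (by omega) (by omega)]
    ring
  · rw [if_neg hn, pvOuter, dif_neg (by omega : ¬ (1 : Int) ≤ n)]

-- ===== VERDICT (by name: the statement is the Claim_ definition above) =====
theorem execute_loops_spec : Claim_equal_execute_loops := by
  intro n _
  exact pv_main n
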